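-- pv_equiv track=rewrite | github.com/NVarun21/GFG | Difficulty: Easy/Max Consecutive Bit/max-consecutive-bit.py | maxConsecBits
-- ===== SOURCE A (Python) =====
-- def maxConsecBits(arr):
--     maxcount = 0
--     count0 = 0
--     count1 = 0
--
--     for num in arr:
--         if num == 0:
--             count0 += 1
--             count1 = 0
--         else:
--             count1 += 1
--             count0 = 0
--
--         maxcount = max(maxcount, count0, count1)
--
--     return maxcount
-- ===== SOURCE B (Python) =====
-- def maxConsecBits(arr):
--     best = 0
--     rest = arr
--     while rest:
--         k = (rest[0] == 0)
--         j = 1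
--         while j < len(rest) and (rest[j] == 0) == k:
--             j += 1
--         best = max(best, j)
--         rest = rest[j:]
--     return best
-- ===== Notes on version B (the rewrite author's own statement) =====
-- stated objective: alternative
-- what changed: Replaces A's three interleaved per-element counters (count0/count1/maxcount) with a group-then-aggregate pass: scan each maximal run of same-key (zero vs non-zero) elements, take its length, and fold max over run lengths.
import Mathlib
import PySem

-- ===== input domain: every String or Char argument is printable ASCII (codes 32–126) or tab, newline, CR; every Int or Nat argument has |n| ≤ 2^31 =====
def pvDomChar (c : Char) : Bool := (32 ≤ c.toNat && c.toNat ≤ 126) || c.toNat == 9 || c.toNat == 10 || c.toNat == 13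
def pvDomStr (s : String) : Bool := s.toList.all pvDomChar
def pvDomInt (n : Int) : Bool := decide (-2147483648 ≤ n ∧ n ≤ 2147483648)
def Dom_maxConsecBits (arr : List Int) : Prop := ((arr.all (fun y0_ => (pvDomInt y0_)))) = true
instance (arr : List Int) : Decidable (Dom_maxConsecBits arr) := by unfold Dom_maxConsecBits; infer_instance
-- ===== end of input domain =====

-- B replaces A's three interleaved counters with a run-scan: take each maximal same-key run, max its length (alternative decomposition, same cost).

-- ===== PORT A =====
-- A: one pass keeping maxcount, count0, count1.
def maxConsecBits (arr : List Int) : Int :=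
  (arr.foldl (fun (st : Int × Int × Int) num =>
    let m := st.1
    let c0 := st.2.1
    let c1 := st.2.2
    if num = 0 then
      (max (max m (c0 + 1)) 0, c0 + 1, 0)
    else
      (max (max m 0) (c1 + 1), 0, c1 + 1)) (0, 0, 0)).1

-- ===== PORT B =====
-- pvRun k l: length of the leading run of l whose key (x == 0) equals k, and the remainder (B's inner while loop).
def pvRun (k : Bool) : List Int → Int × List Int
  | [] => (0, [])
  | x :: xs =>
    if ((x == 0) == k) then
      let r := pvRun k xs
      (r.1 + 1, r.2)
    else (0, x :: xs)

theorem pvRun_len_le (k : Bool) (l : List Int) : (pvRun k l).2.length ≤ l.length := by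
  induction l with
  | nil => simp [pvRun]
  | cons x xs ih =>
    simp only [pvRun]
    split
    · exact Nat.le_succ_of_le ih
    · exact Nat.le_refl _

-- B's outer while loop: peel one maximal run at a time.
def pvAltLoop (best : Int) (l : List Int) : Int :=
  match l with
  | [] => best
  | x :: xs =>
    let r := pvRun (x == 0) xs
    pvAltLoop (max best (r.1 + 1)) r.2
termination_by l.length
decreasing_by
  simpa using Nat.lt_succ_of_le (pvRun_len_le (x == 0) xs)

def maxConsecBits_alt (arr : List Int) : Int := pvAltLoop 0 arr

-- ===== PRECONDITION & SPEC =====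
def Spec_maxConsecBits (arr : List Int) (out : Int) : Prop := out = maxConsecBits_alt arr
instance (arr : List Int) (out : Int) : Decidable (Spec_maxConsecBits arr out) := by unfold Spec_maxConsecBits; infer_instance

-- ===== CLAIM (what is proved, stated in full; the proofs are below) =====
def Claim_equal_maxConsecBits : Prop := ∀ (arr : List Int), Dom_maxConsecBits arr → Spec_maxConsecBits arr (maxConsecBits arr)

-- ===== LEMMAS AND PROOFS =====

-- Intermediate characterisation: pvG c0 c1 l = max over elements of the run count pending at that element.
def pvG (c0 c1 : Int) : List Int → Int
  | [] => 0
  | x :: xs =>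
    if x = 0 then max (c0 + 1) (pvG (c0 + 1) 0 xs)
    else max (c1 + 1) (pvG 0 (c1 + 1) xs)

def pvGK : Bool → Int → List Int → Int
  | true, c, l => pvG c 0 l
  | false, c, l => pvG 0 c l

theorem pvRun_fst_nonneg (k : Bool) (l : List Int) : 0 ≤ (pvRun k l).1 := by
  induction l with
  | nil => simp [pvRun]
  | cons x xs ih =>
    simp only [pvRun]
    split
    · simpa using by omega
    · simp

theorem pvG_foldlA (l : List Int) (c0 c1 m : Int) (hm : 0 ≤ m) :
    (l.foldl (fun (st : Int × Int × Int) num =>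
      let m := st.1
      let c0 := st.2.1
      let c1 := st.2.2
      if num = 0 then
        (max (max m (c0 + 1)) 0, c0 + 1, 0)
      else
        (max (max m 0) (c1 + 1), 0, c1 + 1)) (m, c0, c1)).1
    = max m (pvG c0 c1 l) := by
  induction l generalizing m c0 c1 with
  | nil => simp [pvG]; omega
  | cons x xs ih =>
    by_cases hx : x = 0
    · subst hx
      simp only [List.foldl_cons, pvG, reduceIte]
      rw [ih _ _ _ (by omega)]
      omega
    · simp only [List.foldl_cons, pvG, if_neg hx]
      rw [ih _ _ _ (by omega)]
      omega

theorem pvGK_run (l : List Int) (k : Bool) (c : Int) (hc : 0 ≤ c) :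
    max c (pvGK k c l) = max (c + (pvRun k l).1) (pvG 0 0 (pvRun k l).2) := by
  induction l generalizing c with
  | nil =>
    cases k <;> simp [pvGK, pvG, pvRun]
  | cons x xs ih =>
    have hn := pvRun_fst_nonneg k xs
    cases k with
    | true =>
      simp only [pvGK] at ih ⊢
      by_cases hz : x = 0
      · have h := ih (c + 1) (by omega)
        simp [pvG, pvRun, hz]
        all_goals omega
      · simp [pvG, pvRun, hz]
    | false =>
      simp only [pvGK] at ih ⊢
      by_cases hz : x = 0
      · simp [pvG, pvRun, hz]
      · have h := ih (c + 1) (by omega)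
        simp [pvG, pvRun, hz]
        all_goals omega

theorem pvAltLoop_eq (n : Nat) (l : List Int) (best : Int)
    (hl : l.length ≤ n) (hb : 0 ≤ best) :
    pvAltLoop best l = max best (pvG 0 0 l) := by
  induction n generalizing l best with
  | zero =>
    have : l = [] := by
      cases l with
      | nil => rfl
      | cons x xs => simp at hl
    subst this
    simp [pvAltLoop, pvG]; omega
  | succ n ih =>
    cases l with
    | nil => simp [pvAltLoop, pvG]; omega
    | cons x xs =>
      have hn := pvRun_fst_nonneg (x == 0) xs
      have hlen : (pvRun (x == 0) xs).2.length ≤ n := by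
        have := pvRun_len_le (x == 0) xs
        simp at hl
        omega
      have hrun := pvGK_run xs (x == 0) 1 (by omega)
      rw [pvAltLoop]
      rw [ih _ _ hlen (by omega)]
      by_cases hz : x = 0
      · rw [show (x == 0) = true from by simp [hz]] at hrun hn ⊢
        simp only [pvGK] at hrun
        have hg : pvG 0 0 (x :: xs) = max 1 (pvG 1 0 xs) := by simp [pvG, hz]
        rw [hg]
        omega
      · rw [show (x == 0) = false from by simp [hz]] at hrun hn ⊢
        simp only [pvGK] at hrun
        have hg : pvG 0 0 (x :: xs) = max 1 (pvG 0 1 xs) := by simp [pvG, hz]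
        rw [hg]
        omega

theorem maxConsecBits_eq_alt (arr : List Int) : maxConsecBits arr = maxConsecBits_alt arr := by
  unfold maxConsecBits maxConsecBits_alt
  rw [pvG_foldlA arr 0 0 0 (le_refl 0)]
  rw [pvAltLoop_eq arr.length arr 0 (le_refl _) (le_refl 0)]

-- ===== VERDICT (by name: the statement is the Claim_ definition above) =====
theorem maxConsecBits_spec : Claim_equal_maxConsecBits := by
  intro arr _
  unfold Spec_maxConsecBits
  exact maxConsecBits_eq_alt arr
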